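-- pv_equiv track=rewrite | github.com/ghpm99/kawori-backend | scripts/prepare_release.py | build_regression_test_hints
-- ===== SOURCE A (Python) =====
-- def build_regression_test_hints(changed_files: list[str]) -> list[str]:
--     hints: list[str] = []
--     if any(path.startswith("payment/") for path in changed_files):
--         hints.append("python manage.py test payment")
--     if any(path.startswith("financial/") for path in changed_files):
--         hints.append("python manage.py test financial")
--     if any(path.startswith("audit/") for path in changed_files):
--         hints.append("python manage.py test audit")
--     if any(path.startswith("mailer/") for path in changed_files):
--         hints.append("python manage.py test mailer")
--     if any(path.startswith("scripts/") for path in changed_files):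
--         hints.append("python -m unittest scripts.tests.test_prepare_release")
--     if not hints:
--         hints.append("python manage.py test")
--     return hints
-- ===== SOURCE B (Python) =====
-- _COMMANDS = [
--     "python manage.py test payment",
--     "python manage.py test financial",
--     "python manage.py test audit",
--     "python manage.py test mailer",
--     "python -m unittest scripts.tests.test_prepare_release",
-- ]
-- _APP_INDEX = {"payment": 0, "financial": 1, "audit": 2, "mailer": 3, "scripts": 4}
--
--
-- def build_regression_test_hints(changed_files: list[str]) -> list[str]:
--     # Key each path by its first '/'-separated component and look it up in a
--     # dict of known apps; emit the commands of the matched apps in rank order.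
--     found = set()
--     for path in changed_files:
--         i = path.find("/")
--         if i >= 0:
--             idx = _APP_INDEX.get(path[:i])
--             if idx is not None:
--                 found.add(idx)
--     return [_COMMANDS[i] for i in sorted(found)] or ["python manage.py test"]
-- ===== Notes on version B (the rewrite author's own statement) =====
-- stated objective: faster
-- what changed: Instead of scanning changed_files once per prefix with five any() passes, B makes one pass that extracts each path's first '/'-separated component, looks it up in a dict mapping app name to rank, accumulates matched ranks in a set, and emits the commands of the sorted ranks.
import Mathlib
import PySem

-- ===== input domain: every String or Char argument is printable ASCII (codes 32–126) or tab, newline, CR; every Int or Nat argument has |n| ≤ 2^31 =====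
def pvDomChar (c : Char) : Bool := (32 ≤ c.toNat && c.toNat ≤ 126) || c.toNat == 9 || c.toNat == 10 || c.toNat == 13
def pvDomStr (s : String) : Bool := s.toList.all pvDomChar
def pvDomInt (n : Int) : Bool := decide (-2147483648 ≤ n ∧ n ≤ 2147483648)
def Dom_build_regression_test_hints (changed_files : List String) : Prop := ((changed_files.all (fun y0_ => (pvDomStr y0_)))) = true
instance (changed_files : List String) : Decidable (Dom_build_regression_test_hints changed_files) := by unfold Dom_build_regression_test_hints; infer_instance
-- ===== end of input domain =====

-- B makes one pass extracting each path's first '/'-separated component, looks it up in a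
-- dict of app ranks and emits the commands of the sorted matched ranks (objective: faster;
-- one dict lookup per path instead of five prefix scans of the whole list).

-- ===== PORT A =====
def build_regression_test_hints (changed_files : List String) : List String :=
  let hints : List String := []
  let hints := if changed_files.any (fun path => PySem.Str.startswith path "payment/")
               then hints ++ ["python manage.py test payment"] else hints
  let hints := if changed_files.any (fun path => PySem.Str.startswith path "financial/")
               then hints ++ ["python manage.py test financial"] else hints
  let hints := if changed_files.any (fun path => PySem.Str.startswith path "audit/")
               then hints ++ ["python manage.py test audit"] else hints
  let hints := if changed_files.any (fun path => PySem.Str.startswith path "mailer/")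
               then hints ++ ["python manage.py test mailer"] else hints
  let hints := if changed_files.any (fun path => PySem.Str.startswith path "scripts/")
               then hints ++ ["python -m unittest scripts.tests.test_prepare_release"] else hints
  let hints := if hints = [] then hints ++ ["python manage.py test"] else hints
  hints

-- ===== PORT B =====
def pvCommands : List String :=
  ["python manage.py test payment",
   "python manage.py test financial",
   "python manage.py test audit",
   "python manage.py test mailer",
   "python -m unittest scripts.tests.test_prepare_release"]

def pvAppIndex : PySem.Dict String Int :=
  PySem.Dict.mk [("payment", 0), ("financial", 1), ("audit", 2), ("mailer", 3), ("scripts", 4)]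

-- the body of B's loop: first '/'-separated component, dict lookup, add the rank
def pvStep (s : PySem.Set Int) (path : String) : PySem.Set Int :=
  let i := PySem.Str.find path "/"
  if 0 ≤ i then
    match PySem.Dict.get? pvAppIndex (PySem.Str.slice path (some 0) (some i)) with
    | some idx => PySem.Set.add s idx
    | none => s
  else s

def build_regression_test_hints_alt (changed_files : List String) : List String :=
  let found : PySem.Set Int := changed_files.foldl pvStep PySem.Set.empty
  -- _COMMANDS[i]: i comes from pvAppIndex so it is always in range; .getD "" is unreachable
  let hints := (PySem.List.sorted found (fun x => x)).map
    (fun i => (PySem.List.pyGet? pvCommands i).getD "")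
  if hints = [] then ["python manage.py test"] else hints

-- ===== PRECONDITION & SPEC =====
def Spec_build_regression_test_hints (changed_files : List String) (out : List String) : Prop := out = build_regression_test_hints_alt changed_files
instance (changed_files : List String) (out : List String) : Decidable (Spec_build_regression_test_hints changed_files out) := by unfold Spec_build_regression_test_hints; infer_instance

-- ===== CLAIM (what is proved, stated in full; the proofs are below) =====
def Claim_equal_build_regression_test_hints : Prop := ∀ (changed_files : List String), Dom_build_regression_test_hints changed_files → Spec_build_regression_test_hints changed_files (build_regression_test_hints changed_files)

-- ===== LEMMAS AND PROOFS =====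

-- the text before the first '/' equals `name` (with a '/' present) iff the path starts with "name/"
theorem pv_head_iff (cs name : List Char) (h : ('/' : Char) ∉ name) :
    (0 ≤ PySem.Chars.find cs [('/' : Char)] ∧
      List.take (PySem.Chars.find cs [('/' : Char)]).toNat cs = name)
    ↔ (name ++ [('/' : Char)]) <+: cs := by
  constructor
  · rintro ⟨h0, htake⟩
    obtain ⟨hpre, -⟩ := PySem.Chars.find_spec h0
    obtain ⟨t, ht⟩ := hpre
    refine ⟨t, ?_⟩
    calc (name ++ [('/' : Char)]) ++ t
        = name ++ (('/' : Char) :: t) := by simp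
      _ = List.take (PySem.Chars.find cs [('/' : Char)]).toNat cs
            ++ List.drop (PySem.Chars.find cs [('/' : Char)]).toNat cs := by
            rw [htake, ← ht]; simp
      _ = cs := List.take_append_drop _ _
  · rintro ⟨t, ht⟩
    have hcs : cs = name ++ (('/' : Char) :: t) := by rw [← ht]; simp
    have h0 : 0 ≤ PySem.Chars.find cs [('/' : Char)] := by
      rw [PySem.Chars.find_nonneg_iff]
      exact ⟨name, t, by simpa using ht⟩
    obtain ⟨hpre, hmin⟩ := PySem.Chars.find_spec h0
    have hk1 : (PySem.Chars.find cs [('/' : Char)]).toNat ≤ name.length := by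
      by_contra hgt
      push Not at hgt
      exact hmin name.length hgt ⟨t, by rw [hcs]; simp [List.drop_left']⟩
    have hkey : ∀ k : Nat, k < name.length → cs[k]? ≠ some '/' := by
      intro k hlt hget
      have hn : name[k]? = some '/' := by
        rw [hcs] at hget
        rwa [List.getElem?_append_left hlt] at hget
      exact h (List.mem_of_getElem? hn)
    have hk2 : ¬ (PySem.Chars.find cs [('/' : Char)]).toNat < name.length := by
      intro hlt
      obtain ⟨u, hu⟩ := hpre
      have hget : cs[(PySem.Chars.find cs [('/' : Char)]).toNat]? = some '/' := by
        have hg := congrArg (fun l => l[0]?) hu.symm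
        simpa [List.getElem?_drop] using hg
      exact hkey _ hlt hget
    have hk : (PySem.Chars.find cs [('/' : Char)]).toNat = name.length :=
      le_antisymm hk1 (not_lt.mp hk2)
    exact ⟨h0, by rw [hk, hcs, List.take_left]⟩

-- pvStep with its local binding unfolded (definitional)
theorem pvStep_def (s : PySem.Set Int) (path : String) :
    pvStep s path =
      if 0 ≤ PySem.Str.find path "/" then
        match PySem.Dict.get? pvAppIndex
            (PySem.Str.slice path (some 0) (some (PySem.Str.find path "/"))) with
        | some idx => PySem.Set.add s idx
        | none => s
      else s := rfl

-- the dict lookup as an explicit case split on the key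
theorem pv_get_eq (key : String) :
    PySem.Dict.get? pvAppIndex key =
      if key = "payment" then some 0 else if key = "financial" then some 1
      else if key = "audit" then some 2 else if key = "mailer" then some 3
      else if key = "scripts" then some 4 else none := by
  by_cases h1 : key = "payment"
  · subst h1; decide
  by_cases h2 : key = "financial"
  · subst h2; decide
  by_cases h3 : key = "audit"
  · subst h3; decide
  by_cases h4 : key = "mailer"
  · subst h4; decide
  by_cases h5 : key = "scripts"
  · subst h5; decide
  have b1 : (("payment" : String) == key) = false := beq_eq_false_iff_ne.mpr (Ne.symm h1)
  have b2 : (("financial" : String) == key) = false := beq_eq_false_iff_ne.mpr (Ne.symm h2)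
  have b3 : (("audit" : String) == key) = false := beq_eq_false_iff_ne.mpr (Ne.symm h3)
  have b4 : (("mailer" : String) == key) = false := beq_eq_false_iff_ne.mpr (Ne.symm h4)
  have b5 : (("scripts" : String) == key) = false := beq_eq_false_iff_ne.mpr (Ne.symm h5)
  simp [PySem.Dict.get?, pvAppIndex, List.find?, b1, b2, b3, b4, b5, h1, h2, h3, h4, h5]

-- path starts with "name/" iff a '/' occurs and the text before the first '/' is name
theorem pv_startswith_iff (path nm : String) (hnm : ('/' : Char) ∉ nm.toList) :
    PySem.Str.startswith path (nm ++ "/") = true ↔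
      (0 ≤ PySem.Chars.find path.toList [('/' : Char)] ∧
       List.take (PySem.Chars.find path.toList [('/' : Char)]).toNat path.toList = nm.toList) := by
  rw [PySem.Str.startswith_eq]
  have he : (nm ++ "/").toList = nm.toList ++ [('/' : Char)] := by simp
  rw [he, PySem.Chars.startswith_iff, ← pv_head_iff path.toList nm.toList hnm]

-- the loop body through membership, generically in the lookup's outcome
theorem pv_step_mem_raw (s : PySem.Set Int) (path : String) (idx : Int) :
    idx ∈ pvStep s path ↔
      (idx ∈ s ∨ (0 ≤ PySem.Str.find path "/" ∧
        PySem.Dict.get? pvAppIndex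
          (PySem.Str.slice path (some 0) (some (PySem.Str.find path "/"))) = some idx)) := by
  rw [pvStep_def]
  by_cases h0 : 0 ≤ PySem.Str.find path "/"
  · rw [if_pos h0]
    cases hget : PySem.Dict.get? pvAppIndex
        (PySem.Str.slice path (some 0) (some (PySem.Str.find path "/"))) with
    | some j =>
        simp only [h0, true_and, PySem.Set.mem_add, Option.some.injEq, eq_comm]
    | none =>
        simp only [h0, true_and, reduceCtorEq, or_false]
  · rw [if_neg h0]
    simp only [eq_false h0, false_and, or_false]

-- the lookup succeeds with rank idx exactly on paths starting with "name/"
theorem pv_cond_iff (name : String) (idx : Int) (hm : (name, idx) ∈ pvAppIndex.items)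
    (path : String) :
    (0 ≤ PySem.Str.find path "/" ∧
      PySem.Dict.get? pvAppIndex
        (PySem.Str.slice path (some 0) (some (PySem.Str.find path "/"))) = some idx)
    ↔ PySem.Str.startswith path (name ++ "/") = true := by
  fin_cases hm <;>
  · rw [pv_startswith_iff path _ (by decide), pv_get_eq,
      PySem.Str.find_eq, show ("/" : String).toList = [('/' : Char)] from rfl]
    by_cases h0 : 0 ≤ PySem.Chars.find path.toList [('/' : Char)]
    · have hkey : (PySem.Str.slice path (some 0) (some (PySem.Chars.find path.toList [('/' : Char)]))).toList
          = List.take (PySem.Chars.find path.toList [('/' : Char)]).toNat path.toList := by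
        simp [PySem.Str.slice, PySem.List.slice_zero_start, PySem.List.slice_to _ h0]
      have hkeyeq : ∀ nm : String,
          (PySem.Str.slice path (some 0) (some (PySem.Chars.find path.toList [('/' : Char)])) = nm)
          ↔ List.take (PySem.Chars.find path.toList [('/' : Char)]).toNat path.toList = nm.toList := by
        intro nm
        constructor
        · intro he; rw [← hkey, he]
        · intro he
          exact String.toList_injective (by rw [hkey, he])
      simp only [h0, true_and]
      rw [← hkeyeq]
      split_ifs with e1 e2 e3 e4 e5 <;> simp_all [← hkey]
    · simp [h0]

-- one step of B's loop, seen through membership of a fixed table rank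
theorem pv_step_mem (name : String) (idx : Int) (hm : (name, idx) ∈ pvAppIndex.items)
    (s : PySem.Set Int) (path : String) :
    idx ∈ pvStep s path ↔ (idx ∈ s ∨ PySem.Str.startswith path (name ++ "/") = true) := by
  rw [pv_step_mem_raw, pv_cond_iff name idx hm]

-- B's whole first pass, through membership
theorem pv_fold_mem (name : String) (idx : Int) (hm : (name, idx) ∈ pvAppIndex.items)
    (l : List String) (s : PySem.Set Int) :
    idx ∈ l.foldl pvStep s
      ↔ (idx ∈ s ∨ l.any (fun p => PySem.Str.startswith p (name ++ "/")) = true) := by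
  induction l generalizing s with
  | nil => simp
  | cons p l ih =>
      rw [List.foldl_cons, List.any_cons, ih, pv_step_mem name idx hm]
      simp [or_assoc]

-- every element the first pass adds is one of the five ranks
theorem pv_fold_sub (l : List String) (s : PySem.Set Int) :
    ∀ x ∈ l.foldl pvStep s, x ∈ s ∨ x ∈ ([0, 1, 2, 3, 4] : List Int) := by
  induction l generalizing s with
  | nil => intro x hx; exact Or.inl hx
  | cons p l ih =>
      intro x hx
      rcases ih _ x hx with hs | hv
      · rw [pvStep_def] at hs
        split at hs
        · split at hs
          · rcases (PySem.Set.mem_add _ _ _).mp hs with h | h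
            · exact Or.inl h
            · rename_i heq
              rw [pv_get_eq] at heq
              subst h
              split_ifs at heq <;> simp_all
          · exact Or.inl hs
        · exact Or.inl hs
      · exact Or.inr hv

-- the first pass yields a duplicate-free list
theorem pv_fold_nodup (l : List String) (s : PySem.Set Int) (hs : s.Nodup) :
    (l.foldl pvStep s).Nodup := by
  induction l generalizing s with
  | nil => exact hs
  | cons p l ih =>
      refine ih _ ?_
      rw [pvStep_def]
      split
      · split
        · exact PySem.Set.nodup_add _ _ hs
        · exact hs
      · exact hs

-- ===== VERDICT (by name: the statement is the Claim_ definition above) =====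
theorem build_regression_test_hints_spec : Claim_equal_build_regression_test_hints := by
  intro changed_files _
  unfold Spec_build_regression_test_hints build_regression_test_hints build_regression_test_hints_alt
  have h1 := pv_fold_mem "payment" 0 (by decide) changed_files PySem.Set.empty
  have h2 := pv_fold_mem "financial" 1 (by decide) changed_files PySem.Set.empty
  have h3 := pv_fold_mem "audit" 2 (by decide) changed_files PySem.Set.empty
  have h4 := pv_fold_mem "mailer" 3 (by decide) changed_files PySem.Set.empty
  have h5 := pv_fold_mem "scripts" 4 (by decide) changed_files PySem.Set.empty
  simp only [PySem.Set.empty, List.not_mem_nil, false_or] at h1 h2 h3 h4 h5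
  have hsorted : PySem.List.sorted (changed_files.foldl pvStep PySem.Set.empty) (fun x => x)
      = ([0, 1, 2, 3, 4] : List Int).filter (fun j => decide (j ∈ changed_files.foldl pvStep PySem.Set.empty)) := by
    apply PySem.List.sorted_eq_of_perm_of_pairwise_lt
    · apply List.perm_of_nodup_nodup_toFinset_eq
      · exact List.Nodup.filter _ (show ([0, 1, 2, 3, 4] : List Int).Nodup by decide)
      · exact pv_fold_nodup changed_files PySem.Set.empty (by simp [PySem.Set.empty])
      · ext x
        simp only [List.mem_toFinset, List.mem_filter, decide_eq_true_eq]
        constructor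
        · rintro ⟨-, hx⟩; exact hx
        · intro hx
          refine ⟨?_, hx⟩
          rcases pv_fold_sub changed_files PySem.Set.empty x hx with h | h
          · simp [PySem.Set.empty] at h
          · exact h
    · exact List.Pairwise.filter _ (show ([0, 1, 2, 3, 4] : List Int).Pairwise (· < ·) by decide)
  simp only [show ("payment/" : String) = "payment" ++ "/" from by decide,
    show ("financial/" : String) = "financial" ++ "/" from by decide,
    show ("audit/" : String) = "audit" ++ "/" from by decide,
    show ("mailer/" : String) = "mailer" ++ "/" from by decide,
    show ("scripts/" : String) = "scripts" ++ "/" from by decide]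
  simp only [PySem.Set.empty] at hsorted ⊢
  simp only [hsorted, List.filter_cons, List.filter_nil, decide_eq_true_eq, h1, h2, h3, h4, h5]
  cases changed_files.any (fun p => PySem.Str.startswith p ("payment" ++ "/")) <;>
  cases changed_files.any (fun p => PySem.Str.startswith p ("financial" ++ "/")) <;>
  cases changed_files.any (fun p => PySem.Str.startswith p ("audit" ++ "/")) <;>
  cases changed_files.any (fun p => PySem.Str.startswith p ("mailer" ++ "/")) <;>
  cases changed_files.any (fun p => PySem.Str.startswith p ("scripts" ++ "/")) <;>
  simp <;> decide
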